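-- pv_equiv track=rewrite | github.com/pvkc8888/python-testprograms | Algos Hackerrank/Implementation/Picking_Numbers.py | pickingNumbers
-- ===== SOURCE A (Python) =====
-- def pickingNumbers(a,n):
--     Dict = {}
--     for i in range(n):
--         if a[i] not in Dict:
--             Dict[a[i]] = 1
--         else:
--             Dict[a[i]] += 1
--     maxx = 0
--     total = 0
--     for key,value in Dict.items():
--         if key+1 in Dict:
--             total = Dict[key]+Dict[key+1]
--             if total > maxx:
--                 maxx = total
--         elif value > maxx:
--             maxx = value
--     if maxx == 0:
--         return max(Dict.values())
--     else:
--         return maxx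
-- ===== SOURCE B (Python) =====
-- def pickingNumbers(a, n):
--     xs = sorted([a[i] for i in range(n)])
--     # collapse the sorted values into (value, count) runs, built back-to-front
--     runs = []
--     for x in reversed(xs):
--         if runs and runs[0][0] == x:
--             runs[0] = (x, runs[0][1] + 1)
--         else:
--             runs.insert(0, (x, 1))
--     # candidate total of each run: its count, plus the next run's count when adjacent
--     cands = []
--     rest = runs
--     while rest:
--         v, c = rest[0]
--         if len(rest) > 1 and rest[1][0] == v + 1:
--             cands.append(c + rest[1][1])
--         else:
--             cands.append(c)
--         rest = rest[1:]
--     return max(cands)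
-- ===== Notes on version B (the rewrite author's own statement) =====
-- stated objective: alternative
-- what changed: Replaces the insertion-ordered counting dict with neighbour-key membership lookups by sorting the selected prefix, run-length-encoding it recursively, and taking the max of each run's count plus the adjacent (value+1) run's count.
import Mathlib
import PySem

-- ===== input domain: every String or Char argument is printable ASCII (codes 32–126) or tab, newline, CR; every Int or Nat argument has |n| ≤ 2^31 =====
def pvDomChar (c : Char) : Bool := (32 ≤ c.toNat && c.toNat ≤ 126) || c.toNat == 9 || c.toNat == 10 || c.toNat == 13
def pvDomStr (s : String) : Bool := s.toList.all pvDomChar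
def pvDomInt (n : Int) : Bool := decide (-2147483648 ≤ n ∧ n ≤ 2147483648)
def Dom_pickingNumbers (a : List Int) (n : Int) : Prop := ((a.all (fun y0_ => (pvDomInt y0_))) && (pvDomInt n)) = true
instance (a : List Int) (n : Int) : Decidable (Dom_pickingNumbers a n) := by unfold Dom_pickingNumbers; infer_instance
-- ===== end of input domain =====

-- B replaces A's insertion-ordered counting dict (with key+1 membership lookups) by
-- sort + back-to-front run-length encoding + an adjacent-run scan; alternative decomposition.

-- ===== PORT A =====
-- dict-building step: "if a[i] not in Dict: Dict[a[i]] = 1 else: Dict[a[i]] += 1"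
def pvCountA (d : PySem.Dict Int Int) (x : Int) : PySem.Dict Int Int :=
  if ¬ d.contains x then d.insert x 1 else d.insert x (d.getD x 0 + 1)

-- body of "for key, value in Dict.items(): ..." over the state (maxx, total)
def pvStepA (d : PySem.Dict Int Int) (mt : Int × Int) (kv : Int × Int) : Int × Int :=
  if d.contains (kv.1 + 1) then
    let total := d.getD kv.1 0 + d.getD (kv.1 + 1) 0
    (if total > mt.1 then total else mt.1, total)
  else if kv.2 > mt.1 then (kv.2, mt.2) else mt

def pickingNumbers (a : List Int) (n : Int) : Int :=
  -- a[i]: pyGet? none (IndexError) is excluded by Pre_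
  let d := (PySem.List.pyRange 0 n 1).foldl
    (fun d i => pvCountA d ((PySem.List.pyGet? a i).getD 0)) PySem.Dict.empty
  let mt := d.items.foldl (pvStepA d) (0, 0)
  -- max(Dict.values()): max? none (ValueError on the empty dict) is excluded by Pre_
  if mt.1 = 0 then (PySem.List.max? d.values (fun y => y)).getD 0 else mt.1

-- ===== PORT B =====
-- loop body of "for x in reversed(xs): ..." — prepend a new run or grow the front run
def pvRunStep (rs : List (Int × Int)) (x : Int) : List (Int × Int) :=
  match rs with
  | (u, c) :: r => if u = x then (x, c + 1) :: r else (x, 1) :: (u, c) :: r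
  | [] => [(x, 1)]

-- "while rest: ..." — append each run's candidate total to cands, then drop the front run
def pvCandLoop (cands : List Int) (rest : List (Int × Int)) : List Int :=
  match rest with
  | [] => cands
  | (v, c) :: r =>
    let cand := match r with
      | (u, d) :: _ => if u = v + 1 then c + d else c
      | [] => c
    pvCandLoop (cands ++ [cand]) r

def pickingNumbers_alt (a : List Int) (n : Int) : Int :=
  -- [a[i] for i in range(n)]: pyGet? none (IndexError) is excluded by Pre_
  let xs := (PySem.List.pyRange 0 n 1).map (fun i => (PySem.List.pyGet? a i).getD 0)
  let ys := PySem.List.sorted xs (fun x => x) false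
  let runs := ys.reverse.foldl pvRunStep []
  let cands := pvCandLoop [] runs
  -- max(cands): none (ValueError on the empty list) is excluded by Pre_
  (PySem.List.max? cands (fun y => y)).getD 0

-- ===== PRECONDITION & SPEC =====
-- Exactly the inputs on which A returns: n > len(a) raises IndexError at a[i],
-- and n ≤ 0 leaves the dict empty so max(Dict.values()) raises ValueError.
def Pre_pickingNumbers (a : List Int) (n : Int) : Prop := 1 ≤ n ∧ n ≤ (a.length : Int)
instance (a : List Int) (n : Int) : Decidable (Pre_pickingNumbers a n) := by
  unfold Pre_pickingNumbers; infer_instance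

def pvWitness_pickingNumbers : List Int × Int := ([1, 2, 2, 3], 4)

def Spec_pickingNumbers (a : List Int) (n : Int) (out : Int) : Prop := out = pickingNumbers_alt a n
instance (a : List Int) (n : Int) (out : Int) : Decidable (Spec_pickingNumbers a n out) := by
  unfold Spec_pickingNumbers; infer_instance

-- ===== CLAIM (what is proved, stated in full; the proofs are below) =====
def Claim_equal_pickingNumbers : Prop := ∀ (a : List Int) (n : Int), Dom_pickingNumbers a n → Pre_pickingNumbers a n → Spec_pickingNumbers a n (pickingNumbers a n)

-- ===== LEMMAS AND PROOFS =====

-- recursive (back-to-front) formulations of B's two loops, used only by the proofs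
def pvRuns : List Int → List (Int × Int)
  | [] => []
  | x :: t =>
    match pvRuns t with
    | (u, c) :: r => if u = x then (x, c + 1) :: r else (x, 1) :: (u, c) :: r
    | [] => [(x, 1)]

def pvBests : List (Int × Int) → List Int
  | [] => []
  | (v, c) :: r =>
    (match r with
     | (u, d) :: _ => if u = v + 1 then c + d else c
     | [] => c) :: pvBests r

theorem runs_foldl (ys : List Int) : ys.reverse.foldl pvRunStep [] = pvRuns ys := by
  rw [List.foldl_reverse]
  induction ys with
  | nil => rfl
  | cons x t ih => simp only [List.foldr_cons, ih]; rfl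

theorem candLoop_eq : ∀ (rest : List (Int × Int)) (cands : List Int),
    pvCandLoop cands rest = cands ++ pvBests rest := by
  intro rest
  induction rest with
  | nil => intro cands; simp [pvCandLoop, pvBests]
  | cons p r ih =>
    intro cands
    obtain ⟨v, c⟩ := p
    show pvCandLoop (cands ++ [_]) r = _
    rw [ih]
    simp [pvBests]

-- the per-key candidate both programs maximise: count k, plus count (k+1) when present
def pvG (xs : List Int) (k : Int) : Int :=
  if 0 < xs.count (k + 1) then (xs.count k : Int) + xs.count (k + 1) else (xs.count k : Int)

theorem pvG_nonneg (xs : List Int) (k : Int) : 0 ≤ pvG xs k := by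
  unfold pvG; split <;> positivity

theorem pvG_ge_count (xs : List Int) (k : Int) : (xs.count k : Int) ≤ pvG xs k := by
  unfold pvG; split <;> simp

theorem countA_eq (d : PySem.Dict Int Int) (x : Int) :
    pvCountA d x = d.insert x (d.getD x 0 + 1) := by
  unfold pvCountA
  by_cases h : d.contains x
  · simp [h]
  · rw [if_pos (by simp [h]), PySem.Dict.getD_of_not_contains d 0 (by simp [h])]
    norm_num

theorem dict_eq_counter (xs : List Int) :
    xs.foldl pvCountA PySem.Dict.empty = PySem.Dict.counter xs := by
  have h : pvCountA = fun (d : PySem.Dict Int Int) x => d.insert x (d.getD x 0 + 1) := by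
    funext d x; exact countA_eq d x
  rw [h, PySem.Dict.foldl_insert_getD_add_one_eq_counter]

theorem loopA (xs : List Int) : ∀ (l : List Int) (m t : Int),
    (List.foldl (pvStepA (PySem.Dict.counter xs)) (m, t)
        (l.map (fun k => (k, (xs.count k : Int))))).1
      = l.foldl (fun m k => max m (pvG xs k)) m := by
  intro l
  induction l with
  | nil => intro m t; rfl
  | cons k l ih =>
    intro m t
    simp only [List.map_cons, List.foldl_cons]
    by_cases h : 0 < xs.count (k + 1)
    · have hc : (PySem.Dict.counter xs).contains (k + 1) = true := by
        rw [PySem.Dict.contains_counter]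
        simpa [List.contains_iff_mem] using List.count_pos_iff.mp h
      have : pvStepA (PySem.Dict.counter xs) (m, t) (k, (xs.count k : Int))
          = (max m (pvG xs k), (xs.count k : Int) + xs.count (k + 1)) := by
        simp only [pvStepA, hc, if_true, PySem.Dict.getD_counter, pvG, if_pos h]
        rw [Prod.mk.injEq]
        refine ⟨?_, rfl⟩
        rw [max_def]; split_ifs <;> omega
      rw [this, ih]
    · have hc : (PySem.Dict.counter xs).contains (k + 1) = false := by
        rw [PySem.Dict.contains_counter]
        have hnm : ¬ (k + 1) ∈ xs := fun hmem => h (List.count_pos_iff.mpr hmem)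
        simpa using hnm
      have : pvStepA (PySem.Dict.counter xs) (m, t) (k, (xs.count k : Int))
          = (max m (pvG xs k), t) := by
        simp only [pvStepA, hc, Bool.false_eq_true, if_false, pvG, if_neg h]
        split_ifs with h1 <;> rw [Prod.mk.injEq] <;>
          exact ⟨by rw [max_def]; split_ifs <;> omega, rfl⟩
      rw [this, ih]

theorem runs_head (x : Int) (t : List Int) : ∃ c r, pvRuns (x :: t) = (x, c) :: r := by
  show ∃ c r, (match pvRuns t with
    | (u, c) :: r => if u = x then (x, c + 1) :: r else (x, 1) :: (u, c) :: r
    | [] => [(x, 1)]) = (x, c) :: r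
  match pvRuns t with
  | [] => exact ⟨1, [], rfl⟩
  | (u, c) :: r =>
    by_cases h : u = x
    · exact ⟨c + 1, r, by simp [h]⟩
    · exact ⟨1, (u, c) :: r, by simp [h]⟩

theorem runs_spec : ∀ ys : List Int, ys.Pairwise (· ≤ ·) →
    (∀ p ∈ pvRuns ys, p.2 = (ys.count p.1 : Int)) ∧
    ((pvRuns ys).map Prod.fst).Pairwise (· < ·) ∧
    (∀ k, k ∈ (pvRuns ys).map Prod.fst ↔ k ∈ ys) := by
  intro ys
  induction ys with
  | nil => intro _; refine ⟨by simp [pvRuns], by simp [pvRuns], by simp [pvRuns]⟩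
  | cons x t ih =>
    intro hpw
    have hx : ∀ y ∈ t, x ≤ y := fun y hy => List.rel_of_pairwise_cons hpw hy
    have ht : t.Pairwise (· ≤ ·) := hpw.of_cons
    obtain ⟨hc, hp, hm⟩ := ih ht
    match t, hx, ht, hc, hp, hm with
    | [], _, _, _, _, _ =>
      refine ⟨?_, ?_, ?_⟩ <;> simp [pvRuns]
    | y :: t', hx, ht, hc, hp, hm =>
      obtain ⟨c0, r0, he⟩ := runs_head y t'
      have hstep : pvRuns (x :: y :: t')
          = if y = x then (x, c0 + 1) :: r0 else (x, 1) :: (y, c0) :: r0 := by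
        show (match pvRuns (y :: t') with
          | (u, c) :: r => if u = x then (x, c + 1) :: r else (x, 1) :: (u, c) :: r
          | [] => [(x, 1)]) = _
        rw [he]
      have hymem : y ∈ y :: t' := List.mem_cons_self
      by_cases hxy : y = x
      · subst hxy
        rw [if_pos rfl] at hstep
        have hc0 : c0 = ((y :: t').count y : Int) := hc (y, c0) (he ▸ List.mem_cons_self)
        have hkeys : ((pvRuns (y :: y :: t')).map Prod.fst)
            = ((pvRuns (y :: t')).map Prod.fst) := by
          rw [hstep, he]; simp
        refine ⟨?_, ?_, ?_⟩
        · intro p hpmem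
          rw [hstep] at hpmem
          rcases List.mem_cons.mp hpmem with h1 | h1
          · subst h1
            show c0 + 1 = ((y :: y :: t').count y : Int)
            rw [hc0]
            push_cast [List.count_cons_self]
            ring
          · have hne : p.1 ≠ y := by
              have := he ▸ hp
              simp only [List.map_cons, List.pairwise_cons] at this
              have := this.1 p.1 (List.mem_map_of_mem h1)
              omega
            have h2 := hc p (he ▸ List.mem_cons_of_mem _ h1)
            show p.2 = (((y : Int) :: y :: t').count p.1 : Int)
            rw [List.count_cons_of_ne hne.symm]
            exact h2
        · rw [hkeys]; exact hp
        · intro k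
          rw [hkeys, hm]
          constructor
          · intro h; exact List.mem_cons_of_mem _ h
          · intro h
            rcases List.mem_cons.mp h with h | h
            · subst h; exact hymem
            · exact h
      · have hxy' : x < y := lt_of_le_of_ne (hx y hymem) (fun h => hxy h.symm)
        have hxnot : x ∉ y :: t' := by
          intro hmem
          rcases List.mem_cons.mp hmem with h | h
          · exact hxy h.symm
          · have := List.rel_of_pairwise_cons ht h
            omega
        rw [if_neg hxy] at hstep
        have hkeys : ((pvRuns (x :: y :: t')).map Prod.fst)
            = x :: ((pvRuns (y :: t')).map Prod.fst) := by
          rw [hstep, he]; simp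
        refine ⟨?_, ?_, ?_⟩
        · intro p hpmem
          rw [hstep] at hpmem
          rcases List.mem_cons.mp hpmem with h1 | h1
          · subst h1
            simp only [List.count_cons_self]
            rw [List.count_eq_zero_of_not_mem hxnot]
            rfl
          · have hpt : p ∈ pvRuns (y :: t') := he ▸ h1
            have hne : p.1 ≠ x := by
              intro h
              have : p.1 ∈ y :: t' := (hm p.1).mp (List.mem_map_of_mem hpt)
              exact hxnot (h ▸ this)
            have h2 := hc p hpt
            show p.2 = ((x :: y :: t').count p.1 : Int)
            rw [List.count_cons_of_ne hne.symm]
            exact h2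
        · rw [hkeys]
          refine List.Pairwise.cons ?_ hp
          intro q hq
          have hqt : q ∈ y :: t' := (hm q).mp hq
          have hle := hx q hqt
          have : q ≠ x := fun h => hxnot (h ▸ hqt)
          omega
        · intro k
          rw [hkeys]
          simp only [List.mem_cons, hm k]

theorem bests_spec (ys : List Int) : ∀ rs : List (Int × Int),
    ((rs.map Prod.fst).Pairwise (· < ·)) →
    (∀ p ∈ rs, p.2 = (ys.count p.1 : Int) ∧ p.1 ∈ ys) →
    (∀ k, 0 < ys.count k → k ∈ rs.map Prod.fst ∨ ∀ p ∈ rs, k < p.1) →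
    pvBests rs = rs.map (fun p => pvG ys p.1) := by
  intro rs
  induction rs with
  | nil => intro _ _ _; rfl
  | cons p r ih =>
    intro hpw hcv hmem
    obtain ⟨v, c⟩ := p
    simp only [List.map_cons] at hpw
    have hvlt : ∀ q ∈ r.map Prod.fst, v < q := fun q hq => List.rel_of_pairwise_cons hpw hq
    have hpw' : (r.map Prod.fst).Pairwise (· < ·) := hpw.of_cons
    have hcv' : ∀ p ∈ r, p.2 = (ys.count p.1 : Int) ∧ p.1 ∈ ys :=
      fun p hp => hcv p (List.mem_cons_of_mem _ hp)
    have hmem' : ∀ k, 0 < ys.count k → k ∈ r.map Prod.fst ∨ ∀ p ∈ r, k < p.1 := by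
      intro k hk
      rcases hmem k hk with h | h
      · simp only [List.map_cons, List.mem_cons] at h
        rcases h with h1 | h1
        · subst h1
          exact Or.inr (fun q hq => hvlt q.1 (List.mem_map_of_mem hq))
        · exact Or.inl h1
      · exact Or.inr (fun p hp => h p (List.mem_cons_of_mem _ hp))
    have hc : c = (ys.count v : Int) := (hcv (v, c) List.mem_cons_self).1
    have hz : (v + 1) ∉ ((v, c) :: r).map Prod.fst → ys.count (v + 1) = 0 := by
      intro hn
      by_contra hcnt
      rcases hmem (v + 1) (Nat.pos_of_ne_zero hcnt) with h | h
      · exact hn h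
      · have := h (v, c) List.mem_cons_self
        simp at this
    cases r with
    | nil =>
      have h0 : ys.count (v + 1) = 0 := hz (by simp)
      show [c] = [pvG ys v]
      unfold pvG
      rw [if_neg (by omega), hc]
    | cons q r' =>
      obtain ⟨u, d⟩ := q
      have hvu : v < u := hvlt u (by simp)
      have hrec : pvBests ((u, d) :: r') = ((u, d) :: r').map (fun p => pvG ys p.1) :=
        ih (by simpa using hpw') hcv' hmem'
      have hstep : pvBests ((v, c) :: (u, d) :: r')
          = (if u = v + 1 then c + d else c) :: pvBests ((u, d) :: r') := rfl
      have hcand : (if u = v + 1 then c + d else c) = pvG ys v := by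
        by_cases hu : u = v + 1
        · have hud : d = (ys.count (v + 1) : Int) := hu ▸ (hcv' (u, d) List.mem_cons_self).1
          have humem : (v + 1) ∈ ys := hu ▸ (hcv' (u, d) List.mem_cons_self).2
          have hpos : 0 < ys.count (v + 1) := List.count_pos_iff.mpr humem
          rw [if_pos hu]
          unfold pvG
          rw [if_pos hpos, hc, hud]
        · have h0 : ys.count (v + 1) = 0 := by
            apply hz
            intro hmemk
            simp only [List.map_cons, List.mem_cons] at hmemk
            rcases hmemk with h1 | h1 | h1
            · omega
            · exact hu h1.symm
            · have := List.rel_of_pairwise_cons (by simpa using hpw') h1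
              omega
          rw [if_neg hu]
          unfold pvG
          rw [if_neg (by omega), hc]
      rw [hstep, hcand, hrec]
      rfl

-- A's value as the max of pvG over the distinct selected elements
theorem A_eq (a : List Int) (n : Int) (h : Pre_pickingNumbers a n) :
    pickingNumbers a n
      = (PySem.Set.ofList ((PySem.List.pyRange 0 n 1).map
            (fun i => (PySem.List.pyGet? a i).getD 0)) : List Int).foldl
          (fun m k => max m (pvG ((PySem.List.pyRange 0 n 1).map
            (fun i => (PySem.List.pyGet? a i).getD 0)) k)) 0 := by
  set xs := (PySem.List.pyRange 0 n 1).map (fun i => (PySem.List.pyGet? a i).getD 0) with hxs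
  have hd : (PySem.List.pyRange 0 n 1).foldl
      (fun d i => pvCountA d ((PySem.List.pyGet? a i).getD 0)) PySem.Dict.empty
      = PySem.Dict.counter xs := by
    rw [← dict_eq_counter, List.foldl_map]
  obtain ⟨h1, h2⟩ := h
  have hne : xs ≠ [] := by
    rw [hxs]
    have : PySem.List.pyRange 0 n 1 = 0 :: PySem.List.pyRange 1 n 1 :=
      PySem.List.pyRange_one_cons (by omega)
    rw [this]; simp
  unfold pickingNumbers
  simp only [hd, PySem.Dict.items_counter, loopA xs]
  -- the loop result is ≥ 1, so the "maxx == 0" branch is not taken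
  obtain ⟨x0, xr, hx0⟩ := List.exists_cons_of_ne_nil hne
  obtain ⟨k0, kr, hk0⟩ := List.exists_cons_of_ne_nil (l := (PySem.Set.ofList xs : List Int)) (by
    intro hsl
    have hx0m : x0 ∈ (PySem.Set.ofList xs : List Int) :=
      (PySem.Set.mem_ofList xs x0).mpr (hx0 ▸ List.mem_cons_self)
    rw [hsl] at hx0m
    simp at hx0m)
  have hk0mem : k0 ∈ xs := (PySem.Set.mem_ofList xs k0).mp (hk0 ▸ List.mem_cons_self)
  have hg1 : 1 ≤ pvG xs k0 := by
    have := pvG_ge_count xs k0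
    have hcnt : 0 < xs.count k0 := List.count_pos_iff.mpr hk0mem
    omega
  have hM : 1 ≤ (PySem.Set.ofList xs : List Int).foldl (fun m k => max m (pvG xs k)) 0 := by
    rw [hk0]
    simp only [List.foldl_cons]
    have hfold : ∀ (l : List Int) (m : Int), m ≤ l.foldl (fun m k => max m (pvG xs k)) m := by
      intro l
      induction l with
      | nil => intro m; simp
      | cons q l ih =>
        intro m
        simp only [List.foldl_cons]
        exact le_trans (le_max_left m (pvG xs q)) (ih _)
    calc (1 : Int) ≤ max 0 (pvG xs k0) := le_trans hg1 (le_max_right _ _)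
      _ ≤ _ := hfold kr _
  rw [if_neg (by omega)]

-- B's value as the max of pvG over the keys of the runs of the sorted selection
theorem B_eq (a : List Int) (n : Int) (h : Pre_pickingNumbers a n) :
    pickingNumbers_alt a n
      = ((pvRuns (PySem.List.sorted ((PySem.List.pyRange 0 n 1).map
            (fun i => (PySem.List.pyGet? a i).getD 0)) (fun x => x) false)).map Prod.fst).foldl
          (fun m k => max m (pvG (PySem.List.sorted ((PySem.List.pyRange 0 n 1).map
            (fun i => (PySem.List.pyGet? a i).getD 0)) (fun x => x) false) k)) 0 := by
  set xs := (PySem.List.pyRange 0 n 1).map (fun i => (PySem.List.pyGet? a i).getD 0) with hxs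
  set ys := PySem.List.sorted xs (fun x => x) false with hys
  obtain ⟨h1, h2⟩ := h
  have hpw : ys.Pairwise (· ≤ ·) := PySem.List.sorted_pairwise xs (fun x => x)
  obtain ⟨hc, hp, hm⟩ := runs_spec ys hpw
  have hbests : pvBests (pvRuns ys) = ((pvRuns ys).map Prod.fst).map (fun k => pvG ys k) := by
    have := bests_spec ys (pvRuns ys) hp
      (fun p hp' => ⟨hc p hp', (hm p.1).mp (List.mem_map_of_mem hp')⟩)
      (fun k hk => Or.inl ((hm k).mpr (List.count_pos_iff.mp hk)))
    rw [this, List.map_map]; rfl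
  have hne : ys ≠ [] := by
    rw [hys, Ne, PySem.List.sorted_eq_nil_iff, hxs]
    have : PySem.List.pyRange 0 n 1 = 0 :: PySem.List.pyRange 1 n 1 :=
      PySem.List.pyRange_one_cons (by omega)
    rw [this]; simp
  obtain ⟨y0, yr, hy0⟩ := List.exists_cons_of_ne_nil hne
  obtain ⟨c0, r0, hr0⟩ := runs_head y0 yr
  have hBdef : pickingNumbers_alt a n
      = (PySem.List.max? (pvCandLoop [] (ys.reverse.foldl pvRunStep [])) (fun y => y)).getD 0 := rfl
  rw [hBdef, runs_foldl, candLoop_eq, List.nil_append, hbests]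
  rw [hy0, hr0] at *
  simp only [List.map_cons]
  rw [PySem.List.max?_id_cons]
  simp only [Option.getD_some, List.foldl_cons]
  rw [List.foldl_map, max_eq_right (pvG_nonneg _ y0)]

-- ===== VERDICT (by name: the statement is the Claim_ definition above) =====
theorem pickingNumbers_spec : Claim_equal_pickingNumbers := by
  intro a n _ hpre
  unfold Spec_pickingNumbers
  rw [A_eq a n hpre, B_eq a n hpre]
  set xs := (PySem.List.pyRange 0 n 1).map (fun i => (PySem.List.pyGet? a i).getD 0) with hxs
  set ys := PySem.List.sorted xs (fun x => x) false with hys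
  have hperm : ys.Perm xs := PySem.List.sorted_perm xs (fun x => x) false
  have hgeq : pvG xs = pvG ys := by
    funext k
    unfold pvG
    rw [hperm.count_eq (k + 1), hperm.count_eq k]
  have hpw : ys.Pairwise (· ≤ ·) := PySem.List.sorted_pairwise xs (fun x => x)
  obtain ⟨_, hp, hm⟩ := runs_spec ys hpw
  have hkperm : (PySem.Set.ofList xs : List Int).Perm ((pvRuns ys).map Prod.fst) := by
    rw [List.perm_ext_iff_of_nodup (PySem.Set.nodup_ofList xs)
      (hp.imp (fun {a b} h => ne_of_lt h))]
    intro k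
    rw [PySem.Set.mem_ofList, hm k, PySem.List.mem_sorted]
  rw [hgeq]
  exact hkperm.foldl_eq
    (f := fun m k => max m (pvG ys k)) (rcomm := ⟨fun m k k' => by simp [max_right_comm]⟩) 0
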